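-- pv_equiv track=rewrite | github.com/ShaharAshe/ML_finalProject | debug3.py | addClosing
-- ===== SOURCE A (Python) =====
-- def addClosing(lst):
--     """
--     Adds closing parentheses to a list representing a logical rule.
--
--     Args:
--         lst (list): The list representing the logical rule.
--
--     Returns:
--         list: The list with added closing parentheses.
--     """
--     is_close = True
--     is_in = False
--
--     list_len = len(lst)
--     i = 0
--     while i <= list_len:
--         if is_close and not is_in:
--             lst.insert(i, '(')
--             is_close = False
--             list_len+=1
--         elif (i == list_len or (lst[i] == 'and' and not is_in)) and not is_close:
--                 lst.insert(i, ')')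
--                 is_close = True
--                 list_len+=1
--                 i+=1
--         elif lst[i] == '(':
--             is_in = True
--         elif lst[i] == ')':
--             is_in = False
--         i+=1
--     return lst
-- ===== SOURCE B (Python) =====
-- def addClosing(lst):
--     """Split-then-join reimplementation: split tokens into top-level 'and'-separated
--     groups (a boolean toggle tracks being inside parentheses), then wrap each group
--     in '(' ')' and rejoin with 'and'. Mutates lst in place like the original."""
--     groups = []
--     cur = []
--     inside = False
--     for t in lst:
--         if t == 'and' and not inside:
--             groups.append(cur)
--             cur = []
--         else:
--             if t == '(':
--                 inside = True
--             elif t == ')':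
--                 inside = False
--             cur.append(t)
--     groups.append(cur)
--     out = []
--     for g in groups:
--         if out:
--             out.append('and')
--         out.append('(')
--         out.extend(g)
--         out.append(')')
--     lst[:] = out
--     return lst
-- ===== Notes on version B (the rewrite author's own statement) =====
-- stated objective: simpler
-- what changed: Replaces A's in-place index/insert while-loop with mutating counters by a two-pass split-into-top-level-'and'-groups then wrap-and-join construction.
import Mathlib
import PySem

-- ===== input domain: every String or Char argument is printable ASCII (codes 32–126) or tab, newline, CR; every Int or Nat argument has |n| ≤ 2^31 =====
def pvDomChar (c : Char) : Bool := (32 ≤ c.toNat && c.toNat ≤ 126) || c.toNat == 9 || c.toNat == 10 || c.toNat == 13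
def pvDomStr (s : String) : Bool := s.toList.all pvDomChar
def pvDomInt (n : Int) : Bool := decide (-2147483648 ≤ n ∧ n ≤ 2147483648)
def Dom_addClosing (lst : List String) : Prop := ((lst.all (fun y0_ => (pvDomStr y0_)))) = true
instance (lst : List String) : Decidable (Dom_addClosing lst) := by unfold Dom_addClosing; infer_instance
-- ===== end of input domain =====

-- B rebuilds the list by splitting into top-level 'and' groups and rejoining (simpler two-pass
-- construction); equivalence is about the RETURN value — both Pythons also mutate lst in place.

-- ===== PORT A =====
-- A's while-loop over a growing list: state = (current list, tracked length, index, is_close, is_in).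
-- fuel bounds the iterations (each step strictly decreases 2*(listLen+1-i)+is_close, ≤ 2*len+3 initially).
def addClosingLoop (fuel : Nat) (lst : List String) (listLen i : Nat)
    (isClose isIn : Bool) : List String :=
  match fuel with
  | 0 => lst
  | fuel + 1 =>
    if i ≤ listLen then
      if isClose && !isIn then
        addClosingLoop fuel (lst.insertIdx i "(") (listLen + 1) (i + 1) false isIn
      else if (i == listLen || (lst.getD i "" == "and" && !isIn)) && !isClose then
        addClosingLoop fuel (lst.insertIdx i ")") (listLen + 1) (i + 2) true isIn
      else if lst.getD i "" == "(" then
        addClosingLoop fuel lst listLen (i + 1) isClose true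
      else if lst.getD i "" == ")" then
        addClosingLoop fuel lst listLen (i + 1) isClose false
      else
        addClosingLoop fuel lst listLen (i + 1) isClose isIn
    else lst

def addClosing (lst : List String) : List String :=
  addClosingLoop (2 * lst.length + 4) lst lst.length 0 true false

-- ===== PORT B =====
-- first pass: split into top-level 'and' groups (accumulator cur kept reversed)
def altSplit (inside : Bool) (cur : List String) : List String → List (List String)
  | [] => [cur.reverse]
  | t :: rest =>
    if t == "and" && !inside then
      cur.reverse :: altSplit inside [] rest
    else
      altSplit (if t == "(" then true else if t == ")" then false else inside) (t :: cur) rest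

-- second pass: wrap each group in parentheses, join with 'and'
def altJoin : List (List String) → List String
  | [] => []
  | [g] => "(" :: g ++ [")"]
  | g :: gs => ("(" :: g ++ [")"]) ++ "and" :: altJoin gs

def addClosing_alt (lst : List String) : List String :=
  altJoin (altSplit false [] lst)

-- ===== PRECONDITION & SPEC =====
def Spec_addClosing (lst : List String) (out : List String) : Prop := out = addClosing_alt lst
instance (lst : List String) (out : List String) : Decidable (Spec_addClosing lst out) := by unfold Spec_addClosing; infer_instance

-- ===== CLAIM (what is proved, stated in full; the proofs are below) =====
def Claim_equal_addClosing : Prop := ∀ (lst : List String), Dom_addClosing lst → Spec_addClosing lst (addClosing lst)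

-- ===== LEMMAS AND PROOFS =====

-- what A's loop emits after the already-built prefix, when is_close = false
def emit : List String → Bool → List String
  | [], _ => [")"]
  | t :: rest, isIn =>
    if t == "and" && !isIn then ")" :: "and" :: "(" :: emit rest false
    else if t == "(" then t :: emit rest true
    else if t == ")" then t :: emit rest false
    else t :: emit rest isIn

theorem loop_unfold (fuel : Nat) (lst : List String) (listLen i : Nat)
    (isClose isIn : Bool) :
    addClosingLoop (fuel + 1) lst listLen i isClose isIn =
      (if i ≤ listLen then
        if isClose && !isIn then
          addClosingLoop fuel (lst.insertIdx i "(") (listLen + 1) (i + 1) false isIn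
        else if (i == listLen || (lst.getD i "" == "and" && !isIn)) && !isClose then
          addClosingLoop fuel (lst.insertIdx i ")") (listLen + 1) (i + 2) true isIn
        else if lst.getD i "" == "(" then
          addClosingLoop fuel lst listLen (i + 1) isClose true
        else if lst.getD i "" == ")" then
          addClosingLoop fuel lst listLen (i + 1) isClose false
        else
          addClosingLoop fuel lst listLen (i + 1) isClose isIn
      else lst) := rfl

theorem insertIdx_at_length :
    ∀ (pre xs : List String) (x : String), (pre ++ xs).insertIdx pre.length x = pre ++ x :: xs
  | [], _, _ => rfl
  | h :: t, xs, x => by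
    show ((h :: (t ++ xs)).insertIdx (t.length + 1) x) = _
    rw [List.insertIdx_succ_cons, insertIdx_at_length t xs x]; rfl

theorem getD_at_length : ∀ (pre : List String) (t : String) (xs : List String),
    (pre ++ t :: xs).getD pre.length "" = t
  | [], _, _ => rfl
  | _ :: tl, t, xs => getD_at_length tl t xs

theorem loop_emit (rest : List String) : ∀ (fuel : Nat), 2 * rest.length + 2 ≤ fuel →
    ∀ (pre : List String) (i L : Nat) (isIn : Bool),
    i = pre.length → L = pre.length + rest.length →
    addClosingLoop fuel (pre ++ rest) L i false isIn = pre ++ emit rest isIn := by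
  induction rest with
  | nil =>
    intro fuel hf pre i L isIn hi hL
    subst hi; subst hL
    match fuel, hf with
    | fuel + 2, _ =>
      rw [loop_unfold, if_pos (by simp)]
      have hc : ((pre.length == pre.length + ([] : List String).length ||
          ((pre ++ ([] : List String)).getD pre.length "" == "and" && !isIn)) && !false) = true := by
        simp
      rw [show (false && !isIn) = false from rfl, if_neg (by simp), if_pos hc]
      rw [show (pre ++ ([] : List String)) = pre ++ [] from rfl, insertIdx_at_length pre ([] : List String) ")"]
      rw [loop_unfold, if_neg (by simp)]
      simp [emit]
  | cons t rest ih =>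
    intro fuel hf pre i L isIn hi hL
    subst hi; subst hL
    match fuel, hf with
    | fuel + 2, hf =>
      rw [loop_unfold, if_pos (by simp)]
      rw [show (false && !isIn) = false from rfl, if_neg (by simp)]
      have hne : (pre.length == pre.length + (t :: rest).length) = false := by
        simp
      rw [hne, getD_at_length pre t rest]
      simp only [Bool.false_or, Bool.not_false, Bool.and_true]
      by_cases hand : (t == "and" && !isIn) = true
      · obtain ⟨ht, hIn⟩ := by simpa using hand
        subst ht; subst hIn
        rw [if_pos hand, insertIdx_at_length pre ("and" :: rest) ")"]
        rw [loop_unfold, if_pos (by simp)]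
        rw [if_pos (by simp)]
        have h3 : (pre ++ ")" :: "and" :: rest).insertIdx (pre.length + 2) "("
            = (pre ++ [")", "and", "("]) ++ rest := by
          have := insertIdx_at_length (pre ++ [")", "and"]) rest "("
          simp only [List.length_append, List.length_cons, List.length_nil] at this
          rw [show pre ++ ")" :: "and" :: rest = (pre ++ [")", "and"]) ++ rest by simp,
              show pre.length + 2 = pre.length + (0 + 1 + 1) by omega, this]
          simp
        rw [h3]
        rw [ih fuel (by simp at hf ⊢; omega) (pre ++ [")", "and", "("]) (pre.length + 3)
            (pre.length + ("and" :: rest).length + 1 + 1) false (by simp) (by simp; omega)]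
        simp [emit]
      · rw [if_neg hand]
        have hand' : (t == "and" && !isIn) = false := by
          revert hand; cases (t == "and" && !isIn) <;> simp
        have key : ∀ isIn' : Bool,
            addClosingLoop (fuel + 1) (pre ++ t :: rest) (pre.length + (t :: rest).length)
              (pre.length + 1) false isIn' = pre ++ t :: emit rest isIn' := by
          intro isIn'
          have := ih (fuel + 1) (by simp at hf ⊢; omega) (pre ++ [t]) (pre.length + 1)
            (pre.length + (t :: rest).length) isIn' (by simp) (by simp; omega)
          rw [show (pre ++ [t]) ++ rest = pre ++ t :: rest by simp] at this
          rw [this]; simp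
        by_cases hop : (t == "(") = true
        · rw [if_pos hop, key]
          simp only [beq_iff_eq] at hop; subst hop
          simp [emit]
        · by_cases hcl : (t == ")") = true
          · rw [if_neg (by simp_all), if_pos hcl, key]
            simp only [beq_iff_eq] at hcl; subst hcl
            simp [emit]
          · rw [if_neg (by simp_all), if_neg (by simp_all), key]
            simp [emit, hand', hop, hcl]

theorem altSplit_ne_nil : ∀ (lst : List String) (inside : Bool) (cur : List String),
    altSplit inside cur lst ≠ []
  | [], _, _ => by simp [altSplit]
  | t :: rest, inside, cur => by
    simp only [altSplit]
    split
    · simp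
    · exact altSplit_ne_nil rest _ _

theorem altJoin_cons (g : List String) (gs : List (List String)) (h : gs ≠ []) :
    altJoin (g :: gs) = ("(" :: g ++ [")"]) ++ "and" :: altJoin gs := by
  cases gs with
  | nil => exact absurd rfl h
  | cons a b => rfl

theorem alt_emit (lst : List String) : ∀ (inside : Bool) (cur : List String),
    altJoin (altSplit inside cur lst) = "(" :: cur.reverse ++ emit lst inside := by
  induction lst with
  | nil => intro inside cur; simp [altSplit, altJoin, emit]
  | cons t rest ih =>
    intro inside cur
    by_cases hand : (t == "and" && !inside) = true
    · obtain ⟨ht, hIn⟩ := by simpa using hand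
      subst ht; subst hIn
      rw [show altSplit false cur ("and" :: rest)
            = cur.reverse :: altSplit false [] rest by simp [altSplit]]
      rw [altJoin_cons _ _ (altSplit_ne_nil rest false []), ih]
      simp [emit]
    · have hand' : (t == "and" && !inside) = false := by
        revert hand; cases (t == "and" && !inside) <;> simp
      rw [show altSplit inside cur (t :: rest)
            = altSplit (if t == "(" then true else if t == ")" then false else inside)
                (t :: cur) rest by simp [altSplit, hand']]
      rw [ih]
      by_cases hop : (t == "(") = true
      · simp only [beq_iff_eq] at hop; subst hop
        simp [emit]
      · by_cases hcl : (t == ")") = true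
        · simp only [beq_iff_eq] at hcl; subst hcl
          simp [emit, hop]
        · simp [emit, hand', hop, hcl]

-- ===== VERDICT (by name: the statement is the Claim_ definition above) =====
theorem addClosing_spec : Claim_equal_addClosing := by
  intro lst _
  unfold Spec_addClosing addClosing addClosing_alt
  rw [show 2 * lst.length + 4 = (2 * lst.length + 3) + 1 by omega, loop_unfold,
      if_pos (by omega), if_pos (by simp)]
  rw [show lst.insertIdx 0 "(" = ["("] ++ lst from rfl]
  rw [loop_emit lst (2 * lst.length + 3) (by omega) ["("] 1 (lst.length + 1) false
      rfl (by simp; omega)]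
  rw [alt_emit lst false []]
  simp
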